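-- pv_equiv track=rewrite | github.com/akshay-ap/aquarius | aquarius/app/pool_helper.py | get_accumulative_values
-- ===== SOURCE A (Python) =====
-- def get_accumulative_values(values_list):
--     acc_values = [values_list[0]]
--     n = 0
--     for k, (v, t) in enumerate(values_list[1:]):
--         if acc_values[n][1] == t:
--             acc_values[n] = (acc_values[n][0] + v, t)
--         else:
--             acc_values.append((acc_values[n][0] + v, t))
--             n += 1
--     return acc_values
-- ===== SOURCE B (Python) =====
-- from itertools import groupby
--
-- def get_accumulative_values(values_list):
--     result = []
--     total = 0
--     for t, group in groupby(values_list, key=lambda p: p[1]):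
--         for v, _ in group:
--             total += v
--         result.append((total, t))
--     return result
-- ===== Notes on version B (the rewrite author's own statement) =====
-- stated objective: idiomatic
-- what changed: B replaces A's indexed in-place mutation of the last accumulator entry with itertools.groupby over consecutive equal timestamps plus a running total, appending one (total, t) pair per group.
-- crash fix: On the empty list A raises IndexError (values_list[0]); B returns []. — e.g. on get_accumulative_values([]): A raises IndexError, B returns []
import Mathlib
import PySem

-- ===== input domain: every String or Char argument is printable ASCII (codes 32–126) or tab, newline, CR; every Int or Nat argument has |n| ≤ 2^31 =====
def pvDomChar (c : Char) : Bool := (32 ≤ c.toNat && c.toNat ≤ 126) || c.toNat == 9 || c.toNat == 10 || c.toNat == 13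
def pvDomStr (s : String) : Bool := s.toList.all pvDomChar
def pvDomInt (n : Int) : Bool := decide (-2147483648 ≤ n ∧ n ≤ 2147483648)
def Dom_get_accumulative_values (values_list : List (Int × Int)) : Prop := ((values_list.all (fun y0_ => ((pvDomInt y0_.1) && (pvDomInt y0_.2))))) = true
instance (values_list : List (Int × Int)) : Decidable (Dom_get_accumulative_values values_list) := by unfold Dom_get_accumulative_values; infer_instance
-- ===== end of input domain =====

-- B replaces A's indexed mutation of the last accumulator entry with consecutive grouping
-- (itertools.groupby) and a running total (idiomatic; return value equivalence only).

-- ===== PORT A =====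
-- one loop step of A: state is (acc_values, n); index n is always ≥ 0 and in range,
-- so acc_values[n] is read with pyGet? (the none branch is unreachable) and written with List.set.
def pvAStep (st : List (Int × Int) × Int) (p : Int × Int) : List (Int × Int) × Int :=
  let (acc, n) := st
  let (v, t) := p
  match PySem.List.pyGet? acc n with
  | some (a, b) =>
      if b = t then (acc.set n.toNat (a + v, t), n)
      else (acc ++ [(a + v, t)], n + 1)
  | none => (acc, n)  -- unreachable: n indexes the last element of acc

-- A raises IndexError on [] (values_list[0]); the [] branch here is junk, excluded by Pre_.
def get_accumulative_values (values_list : List (Int × Int)) : List (Int × Int) :=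
  match values_list with
  | [] => []
  | x :: rest => (rest.foldl pvAStep ([x], 0)).1   -- enumerate's k is unused in A

-- ===== PORT B =====
-- port of itertools.groupby on key p.2: split off the run of equal keys …
def pvSpan (t : Int) : List (Int × Int) → List (Int × Int) × List (Int × Int)
  | [] => ([], [])
  | (v, u) :: xs =>
      if u = t then
        let (g, r) := pvSpan t xs
        ((v, u) :: g, r)
      else ([], (v, u) :: xs)

theorem pvSpan_snd_length (t : Int) : ∀ xs : List (Int × Int), (pvSpan t xs).2.length ≤ xs.length := by
  intro xs
  induction xs with
  | nil => simp [pvSpan]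
  | cons x xs ih =>
      obtain ⟨v, u⟩ := x
      simp only [pvSpan]
      split
      · simpa using Nat.le_succ_of_le ih
      · simp

-- … yielding the list of (key, group) pairs groupby produces
def pvGroups : List (Int × Int) → List (Int × List (Int × Int))
  | [] => []
  | (v, t) :: xs => (t, (v, t) :: (pvSpan t xs).1) :: pvGroups (pvSpan t xs).2
  termination_by xs => xs.length
  decreasing_by
    exact Nat.lt_succ_of_le (pvSpan_snd_length t xs)

-- one step of B's outer loop: fold the group's values into the running total, append (total, t)
def pvBStep (st : Int × List (Int × Int)) (grp : Int × List (Int × Int)) : Int × List (Int × Int) :=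
  let (total, result) := st
  let (t, items) := grp
  let total' := items.foldl (fun a p => a + p.1) total
  (total', result ++ [(total', t)])

def get_accumulative_values_alt (values_list : List (Int × Int)) : List (Int × Int) :=
  ((pvGroups values_list).foldl pvBStep (0, [])).2

-- ===== PRECONDITION & SPEC =====
-- Pre_ excludes only the empty list, on which A raises IndexError (values_list[0]).
def Pre_get_accumulative_values (values_list : List (Int × Int)) : Prop := values_list ≠ []
instance (values_list : List (Int × Int)) : Decidable (Pre_get_accumulative_values values_list) := by unfold Pre_get_accumulative_values; infer_instance
def pvWitness_get_accumulative_values : (List (Int × Int)) := [(2, 1), (3, 1), (4, 7)]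

-- On the empty list A raises IndexError; B returns [].
def Raises_get_accumulative_values (values_list : List (Int × Int)) : Prop := values_list = []
instance (values_list : List (Int × Int)) : Decidable (Raises_get_accumulative_values values_list) := by unfold Raises_get_accumulative_values; infer_instance
def pvRaiseWitness_get_accumulative_values : (List (Int × Int)) := []
def pvRaiseWitnessOut_get_accumulative_values : List (Int × Int) := []

def Spec_get_accumulative_values (values_list : List (Int × Int)) (out : List (Int × Int)) : Prop := out = get_accumulative_values_alt values_list
instance (values_list : List (Int × Int)) (out : List (Int × Int)) : Decidable (Spec_get_accumulative_values values_list out) := by unfold Spec_get_accumulative_values; infer_instance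

-- ===== CLAIM (what is proved, stated in full; the proofs are below) =====
def Claim_equal_get_accumulative_values : Prop := ∀ (values_list : List (Int × Int)), Dom_get_accumulative_values values_list → Pre_get_accumulative_values values_list → Spec_get_accumulative_values values_list (get_accumulative_values values_list)
def Claim_raises_get_accumulative_values : Prop := (∀ (values_list : List (Int × Int)), Dom_get_accumulative_values values_list → Raises_get_accumulative_values values_list → ¬ Pre_get_accumulative_values values_list) ∧ (Dom_get_accumulative_values (pvRaiseWitness_get_accumulative_values) ∧ Raises_get_accumulative_values (pvRaiseWitness_get_accumulative_values) ∧ get_accumulative_values_alt (pvRaiseWitness_get_accumulative_values) = pvRaiseWitnessOut_get_accumulative_values)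

-- ===== LEMMAS AND PROOFS =====

-- unfolding equations for pvGroups (a well-founded recursion, opaque to rfl)
theorem pvGroups_nil : pvGroups [] = [] := by
  unfold pvGroups
  rfl

theorem pvGroups_cons (v t : Int) (xs : List (Int × Int)) :
    pvGroups ((v, t) :: xs) =
      (t, (v, t) :: (pvSpan t xs).1) :: pvGroups (pvSpan t xs).2 := by
  conv_lhs => rw [pvGroups]

-- the element after the span has a different key
theorem pvSpan_rest_key (t : Int) : ∀ (xs : List (Int × Int)) (v1 t1 : Int) (r' : List (Int × Int)),
    (pvSpan t xs).2 = (v1, t1) :: r' → t1 ≠ t := by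
  intro xs
  induction xs with
  | nil => intro v1 t1 r' h; simp [pvSpan] at h
  | cons y ys ih =>
      intro v1 t1 r' h
      obtain ⟨vv, uu⟩ := y
      by_cases hu : uu = t
      · simp only [pvSpan, if_pos hu] at h
        exact ih v1 t1 r' h
      · simp only [pvSpan, if_neg hu] at h
        injection h with h1 h2
        cases h1
        exact hu

-- pulling the start value out of the summing fold
theorem pvFoldShift : ∀ (l : List (Int × Int)) (a : Int),
    l.foldl (fun a p => a + p.1) a = a + l.foldl (fun a p => a + p.1) 0 := by
  intro l
  induction l with
  | nil => intro a; simp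
  | cons y l ihl =>
      intro a
      simp only [List.foldl_cons]
      rw [ihl (a + y.1), ihl (0 + y.1)]
      ring

-- reference function: the accumulative list from current total s and current timestamp tl
def pvRes (s tl : Int) : List (Int × Int) → List (Int × Int)
  | [] => [(s, tl)]
  | (v, t) :: xs => if t = tl then pvRes (s + v) tl xs else (s, tl) :: pvRes (s + v) t xs

-- A's loop in terms of pvRes
theorem pvAStep_loop :
    ∀ (xs : List (Int × Int)) (r : List (Int × Int)) (s tl : Int),
      (xs.foldl pvAStep (r ++ [(s, tl)], (r.length : Int))).1 = r ++ pvRes s tl xs := by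
  intro xs
  induction xs with
  | nil => intro r s tl; simp [pvRes]
  | cons x xs ih =>
      intro r s tl
      obtain ⟨v, t⟩ := x
      have hget : PySem.List.pyGet? (r ++ [(s, tl)]) (r.length : Int) = some (s, tl) := by
        simp [PySem.List.pyGet?, PySem.List.pyIdx?]
      by_cases h : tl = t
      · subst h
        have hset : (r ++ [(s, tl)]).set ((r.length : Int)).toNat (s + v, tl) = r ++ [(s + v, tl)] := by
          simp
        simp only [List.foldl_cons, pvAStep, hget, if_true, hset]
        rw [ih r (s + v) tl]
        simp [pvRes]
      · simp only [List.foldl_cons, pvAStep, hget, if_neg h]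
        have harr : r ++ [(s, tl)] ++ [(s + v, t)] = (r ++ [(s, tl)]) ++ [(s + v, t)] := by simp
        have hlen : ((r.length : Int) + 1) = ((r ++ [(s, tl)]).length : Int) := by simp
        rw [harr, hlen, ih (r ++ [(s, tl)]) (s + v) t]
        have hres : pvRes s tl ((v, t) :: xs) = (s, tl) :: pvRes (s + v) t xs := by
          simp only [pvRes]
          rw [if_neg (fun h' : t = tl => h h'.symm)]
        rw [hres]
        simp

-- pvRes consumes exactly one span-group per emitted entry
theorem pvRes_span : ∀ (xs : List (Int × Int)) (s tl : Int),
    pvRes s tl xs =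
      (s + (pvSpan tl xs).1.foldl (fun a p => a + p.1) 0, tl) ::
        (match (pvSpan tl xs).2 with
         | [] => []
         | (v, t) :: r => pvRes (s + (pvSpan tl xs).1.foldl (fun a p => a + p.1) 0 + v) t r) := by
  intro xs
  induction xs with
  | nil => intro s tl; simp [pvRes, pvSpan]
  | cons x xs ih =>
      intro s tl
      obtain ⟨v, u⟩ := x
      by_cases h : u = tl
      · subst h
        have hstep : pvRes s u ((v, u) :: xs) = pvRes (s + v) u xs := by
          simp [pvRes]
        have hspan1 : (pvSpan u ((v, u) :: xs)).1 = (v, u) :: (pvSpan u xs).1 := by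
          simp [pvSpan]
        have hspan2 : (pvSpan u ((v, u) :: xs)).2 = (pvSpan u xs).2 := by
          simp [pvSpan]
        rw [hstep, ih (s + v) u, hspan1, hspan2]
        have hsum : s + (((v, u) :: (pvSpan u xs).1).foldl (fun a p => a + p.1) 0) =
            s + v + ((pvSpan u xs).1.foldl (fun a p => a + p.1) 0) := by
          simp only [List.foldl_cons]
          rw [pvFoldShift (pvSpan u xs).1 (0 + v)]
          ring
        rw [hsum]
      · simp [pvRes, pvSpan, fun h' : u = tl => h h']

-- B's loop in terms of pvRes (strong induction on the tail length)
theorem pvBStep_loop :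
    ∀ (n : Nat) (xs : List (Int × Int)) (v t total : Int) (acc : List (Int × Int)),
      xs.length ≤ n →
      ((pvGroups ((v, t) :: xs)).foldl pvBStep (total, acc)).2 = acc ++ pvRes (total + v) t xs := by
  intro n
  induction n with
  | zero =>
      intro xs v t total acc hlen
      have hx : xs = [] := List.eq_nil_of_length_eq_zero (Nat.le_zero.mp hlen)
      subst hx
      rw [pvGroups_cons]
      simp only [pvSpan]
      rw [pvGroups_nil]
      simp [pvBStep, pvRes]
  | succ n ih =>
      intro xs v t total acc hlen
      have hspan := pvSpan_snd_length t xs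
      rw [pvGroups_cons]
      rcases hr : (pvSpan t xs).2 with _ | ⟨⟨v1, t1⟩, r'⟩
      · -- whole tail is one run
        rw [pvGroups_nil]
        simp only [List.foldl_cons, List.foldl_nil, pvBStep]
        rw [pvRes_span xs (total + v) t, hr]
        rw [pvFoldShift (pvSpan t xs).1 (total + v)]
      · -- another group follows; its key differs from t
        have ht1 : t1 ≠ t := pvSpan_rest_key t xs v1 t1 r' hr
        have hlen' : r'.length ≤ n := by
          have h2 : ((v1, t1) :: r').length ≤ xs.length := hr ▸ hspan
          simp only [List.length_cons] at h2
          omega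
        simp only [List.foldl_cons, pvBStep]
        rw [pvFoldShift (pvSpan t xs).1 (total + v)]
        rw [ih r' v1 t1 _ _ hlen']
        rw [pvRes_span xs (total + v) t, hr]
        rw [pvFoldShift]
        simp [List.append_assoc]

-- ===== VERDICT (by name: the statement is the Claim_ definition above) =====
theorem get_accumulative_values_spec : Claim_equal_get_accumulative_values := by
  unfold Claim_equal_get_accumulative_values
  intro vl _ hpre
  unfold Spec_get_accumulative_values
  match vl with
  | [] => exact absurd rfl hpre
  | (v, t) :: xs =>
      show (xs.foldl pvAStep ([(v, t)], 0)).1 = _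
      have hA := pvAStep_loop xs [] v t
      simp only [List.nil_append, List.length_nil, Nat.cast_zero] at hA
      have hB := pvBStep_loop xs.length xs v t 0 [] (Nat.le_refl _)
      unfold get_accumulative_values_alt
      rw [hB, hA]
      simp

@[simp] theorem get_accumulative_values_raises : Claim_raises_get_accumulative_values := by
  unfold Claim_raises_get_accumulative_values
  constructor
  · intro vl _ hr
    unfold Raises_get_accumulative_values at hr
    unfold Pre_get_accumulative_values
    simp [hr]
  · refine ⟨by decide, rfl, ?_⟩
    show ((pvGroups ([] : List (Int × Int))).foldl pvBStep (0, [])).2 = ([] : List (Int × Int))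
    rw [pvGroups_nil]
    rfl
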